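-- pv_equiv track=rewrite | github.com/LucasConde22/TPs-TDA | Guías/DyC/16.py | _encontrar_joya
-- ===== SOURCE A (Python) =====
-- def _encontrar_joya(joyas, ini, fin):
--     if ini == fin:
--         return ini
--
--     medio = (ini + fin) // 2
--     ajuste = 0 # Creo que se tiene que poder prescidir de esta variable, pero no tengo ganas de pensar
--
--     if (fin - ini) % 2 == 0:
--         pesaje = balanza(joyas[ini : medio + 1], joyas[medio : fin + 1])
--         ajuste = -1
--     else:
--         pesaje = balanza(joyas[ini : medio + 1], joyas[medio + 1 : fin + 1])
--
--     if pesaje == 0: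
--         return medio
--     if pesaje == 1:
--         return _encontrar_joya(joyas, ini, medio + ajuste)
--     return _encontrar_joya(joyas, medio + 1, fin)
--
-- def balanza(arr1, arr2):
--     if len(arr1) != len(arr2):
--         raise Exception("error!")
--
--     suma1, suma2 = 0, 0
--     for i in range(len(arr1)):
--         suma1 += arr1[i]
--         suma2 += arr2[i]
--
--     if suma1 == suma2:
--         return 0
--     if suma1 > suma2:
--         return 1
--     return -1
-- ===== SOURCE B (Python) =====
-- def _encontrar_joya(joyas, ini, fin):
--     # Prefix sums once, then an iterative binary search; each weighing is O(1).
--     # Invariant: the jewel lies in [ini, fin]; when the interval collapses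
--     # (or is empty) its midpoint is the answer.
--     pref = [0]
--     s = 0
--     for x in joyas:
--         s += x
--         pref.append(s)
--     while True:
--         medio = (ini + fin) // 2
--         if ini >= fin:
--             return medio
--         izq = pref[medio + 1] - pref[ini]
--         if (fin - ini) % 2 == 0:
--             der = pref[fin + 1] - pref[medio]
--             if izq == der:
--                 return medio
--             if izq > der:
--                 fin = medio - 1
--             else:
--                 ini = medio + 1
--         else:
--             der = pref[fin + 1] - pref[medio + 1]
--             if izq == der:
--                 return medio
--             if izq > der:
--                 fin = medio
--             else:
--                 ini = medio + 1
-- ===== Notes on version B (the rewrite author's own statement) =====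
-- stated objective: alternative
-- what changed: Replaces the recursive halving that re-sums both slice halves with balanza at every level with one prefix-sum pass followed by an iterative binary-search loop whose weighings are O(1) subtractions.
-- outside the precondition, e.g. on _encontrar_joya([5], 2, 3): A returns 2, B raises IndexError; on _encontrar_joya([1, 2, 3], -3, 1): A returns -1, B returns -2
import Mathlib
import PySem

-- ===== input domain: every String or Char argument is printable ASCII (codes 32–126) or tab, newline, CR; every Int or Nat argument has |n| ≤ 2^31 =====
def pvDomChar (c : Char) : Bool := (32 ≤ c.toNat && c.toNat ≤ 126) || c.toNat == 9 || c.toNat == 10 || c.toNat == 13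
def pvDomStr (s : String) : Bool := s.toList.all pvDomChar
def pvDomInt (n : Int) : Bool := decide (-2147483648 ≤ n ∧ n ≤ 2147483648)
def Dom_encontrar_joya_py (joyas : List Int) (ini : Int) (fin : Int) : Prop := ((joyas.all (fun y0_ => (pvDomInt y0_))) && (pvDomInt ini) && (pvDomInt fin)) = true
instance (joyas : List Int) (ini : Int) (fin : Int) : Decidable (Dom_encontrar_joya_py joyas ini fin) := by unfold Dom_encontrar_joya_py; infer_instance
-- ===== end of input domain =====

-- B replaces A's recursive halving with re-summed slices by one prefix-sum pass plus an
-- iterative binary-search loop with O(1) weighings; equivalence proved on in-range searches.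


-- ===== PORT A =====
-- balanza: raises (none) on unequal lengths; otherwise the three-way sum comparison.
def balanzaPy (arr1 arr2 : List Int) : Option Int :=
  if arr1.length ≠ arr2.length then none
  else
    let suma1 := arr1.foldl (· + ·) 0
    let suma2 := arr2.foldl (· + ·) 0
    if suma1 = suma2 then some 0
    else if suma1 > suma2 then some 1
    else some (-1)

-- fuel only makes the recursion total in Lean; inside Pre_ it never runs out
-- ((fin-ini).toNat+1 strictly bounds the recursion depth there).
def encontrarAux : Nat → List Int → Int → Int → Int
  | 0, _, _, _ => 0
  | fuel+1, joyas, ini, fin =>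
    if ini = fin then ini
    else
      let medio := PySem.Int.floordiv (ini + fin) 2
      if PySem.Int.mod (fin - ini) 2 = 0 then
        let pesaje := (balanzaPy (PySem.List.slice joyas (some ini) (some (medio + 1)))
                                 (PySem.List.slice joyas (some medio) (some (fin + 1)))).getD 0
        if pesaje = 0 then medio
        else if pesaje = 1 then encontrarAux fuel joyas ini (medio - 1)  -- ajuste = -1
        else encontrarAux fuel joyas (medio + 1) fin
      else
        let pesaje := (balanzaPy (PySem.List.slice joyas (some ini) (some (medio + 1)))
                                 (PySem.List.slice joyas (some (medio + 1)) (some (fin + 1)))).getD 0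
        if pesaje = 0 then medio
        else if pesaje = 1 then encontrarAux fuel joyas ini medio        -- ajuste = 0
        else encontrarAux fuel joyas (medio + 1) fin

def encontrar_joya_py (joyas : List Int) (ini : Int) (fin : Int) : Int :=
  encontrarAux ((fin - ini).toNat + 1) joyas ini fin

-- ===== PORT B =====
-- pref = [0]; s = 0; for x in joyas: s += x; pref.append(s)
def buildPref (joyas : List Int) : List Int :=
  (joyas.foldl (fun (st : List Int × Int) x => (st.1 ++ [st.2 + x], st.2 + x)) ([0], 0)).1

-- pref[i] (in-range indexing in Source B; out of range it raises, excluded by Pre_)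
def segGet (pref : List Int) (i : Int) : Int := (PySem.List.pyGet? pref i).getD 0

def joyaLoopAux : Nat → List Int → Int → Int → Int
  | 0, _, ini, fin => PySem.Int.floordiv (ini + fin) 2
  | fuel+1, pref, ini, fin =>
    let medio := PySem.Int.floordiv (ini + fin) 2
    if ini ≥ fin then medio
    else
      let izq := segGet pref (medio + 1) - segGet pref ini
      if PySem.Int.mod (fin - ini) 2 = 0 then
        let der := segGet pref (fin + 1) - segGet pref medio
        if izq = der then medio
        else if izq > der then joyaLoopAux fuel pref ini (medio - 1)
        else joyaLoopAux fuel pref (medio + 1) fin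
      else
        let der := segGet pref (fin + 1) - segGet pref (medio + 1)
        if izq = der then medio
        else if izq > der then joyaLoopAux fuel pref ini medio
        else joyaLoopAux fuel pref (medio + 1) fin

-- fuel bounds the while-loop's iteration count; inside Pre_ it never runs out.
def encontrar_joya_py_alt (joyas : List Int) (ini : Int) (fin : Int) : Int :=
  joyaLoopAux ((fin - ini).toNat + 1) (buildPref joyas) ini fin

-- ===== PRECONDITION & SPEC =====
-- length of the Python slice joyas[a:b] (clamped, possibly-negative bounds)
def sliceLenP (n : Nat) (a b : Int) : Nat :=
  PySem.List.clampIdx n b - PySem.List.clampIdx n a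

-- Pre_ admits (a) search ranges lying inside the list and (b) empty/inverted ranges
-- (fin ≤ ini) on which balanza's two slices have equal length so A returns; it
-- excludes inputs where A raises in balanza and the out-of-range ranges with
-- ini < fin, where A's returned index is an accident of Python's slice
-- clamping/negative wraparound while B's direct prefix indexing raises or wraps.
def Pre_encontrar_joya_py (joyas : List Int) (ini : Int) (fin : Int) : Prop :=
  (0 ≤ ini ∧ ini ≤ fin ∧ fin < joyas.length) ∨
  (fin ≤ ini ∧
    (if PySem.Int.mod (fin - ini) 2 = 0 then
      sliceLenP joyas.length ini (PySem.Int.floordiv (ini + fin) 2 + 1)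
        = sliceLenP joyas.length (PySem.Int.floordiv (ini + fin) 2) (fin + 1)
    else
      sliceLenP joyas.length ini (PySem.Int.floordiv (ini + fin) 2 + 1)
        = sliceLenP joyas.length (PySem.Int.floordiv (ini + fin) 2 + 1) (fin + 1)))
instance (joyas : List Int) (ini : Int) (fin : Int) : Decidable (Pre_encontrar_joya_py joyas ini fin) := by
  unfold Pre_encontrar_joya_py; infer_instance

def pvWitness_encontrar_joya_py : List Int × Int × Int := ([1, 2, 4, 1], 0, 3)

def Spec_encontrar_joya_py (joyas : List Int) (ini : Int) (fin : Int) (out : Int) : Prop := out = encontrar_joya_py_alt joyas ini fin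
instance (joyas : List Int) (ini : Int) (fin : Int) (out : Int) : Decidable (Spec_encontrar_joya_py joyas ini fin out) := by unfold Spec_encontrar_joya_py; infer_instance

-- ===== CLAIM (what is proved, stated in full; the proofs are below) =====
def Claim_equal_encontrar_joya_py : Prop := ∀ (joyas : List Int) (ini : Int) (fin : Int), Dom_encontrar_joya_py joyas ini fin → Pre_encontrar_joya_py joyas ini fin → Spec_encontrar_joya_py joyas ini fin (encontrar_joya_py joyas ini fin)

-- ===== LEMMAS AND PROOFS =====

lemma foldl_add_eq (l : List Int) (s : Int) : l.foldl (· + ·) s = s + l.sum := by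
  induction l generalizing s with
  | nil => simp
  | cons x t ih => simp [List.foldl, ih]; ring

lemma balanzaPy_eq (a b : List Int) (h : a.length = b.length) :
    balanzaPy a b = some (if a.sum = b.sum then 0 else if a.sum > b.sum then (1 : Int) else -1) := by
  unfold balanzaPy
  rw [if_neg (by omega)]
  simp only [foldl_add_eq, zero_add]
  split_ifs <;> rfl

lemma buildPref_step (l : List Int) (p : List Int) (s : Int) :
    l.foldl (fun (st : List Int × Int) x => (st.1 ++ [st.2 + x], st.2 + x)) (p, s)
      = (p ++ (List.range l.length).map (fun i => s + (l.take (i + 1)).sum), s + l.sum) := by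
  induction l generalizing p s with
  | nil => simp
  | cons x t ih =>
    simp only [List.foldl_cons, ih, List.length_cons, List.range_succ_eq_map, List.map_cons,
      List.map_map, List.sum_cons, List.take_succ_cons, List.take_zero, List.sum_nil,
      add_zero, Prod.mk.injEq]
    refine ⟨?_, by ring⟩
    have hfun : ((fun i => s + (x + (t.take i).sum)) ∘ Nat.succ)
        = (fun i => s + x + (t.take (i + 1)).sum) := by
      funext i
      simp only [Function.comp]
      ring
    rw [hfun, List.append_assoc, List.singleton_append]

lemma buildPref_eq (l : List Int) :
    buildPref l = (List.range (l.length + 1)).map (fun i => (l.take i).sum) := by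
  unfold buildPref
  rw [buildPref_step]
  rw [List.range_succ_eq_map, List.map_cons, List.map_map]
  simp [Function.comp]

lemma segGet_buildPref (l : List Int) (i : Int) (h0 : 0 ≤ i) (h1 : i ≤ l.length) :
    segGet (buildPref l) i = (l.take i.toNat).sum := by
  unfold segGet
  rw [buildPref_eq]
  have : i = ((i.toNat : Nat) : Int) := by omega
  rw [this, PySem.List.pyGet?_natCast]
  rw [List.getElem?_map, List.getElem?_range (by omega)]
  have hmax : max i 0 = i := by omega
  simp [hmax]

lemma slice_sum (l : List Int) (a b : Int) (h0 : 0 ≤ a) (hab : a ≤ b) (_hb : b ≤ l.length) :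
    (PySem.List.slice l (some a) (some b)).sum = (l.take b.toNat).sum - (l.take a.toNat).sum := by
  rw [PySem.List.slice_toNat _ h0 (by omega)]
  have hsplit : b.toNat = a.toNat + (b.toNat - a.toNat) := by omega
  have : (l.take b.toNat).sum = (l.take a.toNat).sum + ((l.drop a.toNat).take (b.toNat - a.toNat)).sum := by
    rw [hsplit, List.take_add, List.sum_append]
    have h2 : a.toNat + (b.toNat - a.toNat) - a.toNat = b.toNat - a.toNat := by omega
    rw [h2]
  omega

lemma slice_len (l : List Int) (a b : Int) (h0 : 0 ≤ a) (hab : a ≤ b) (_hb : b ≤ l.length) :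
    (PySem.List.slice l (some a) (some b)).length = (b - a).toNat := by
  rw [PySem.List.slice_toNat _ h0 (by omega)]
  simp [List.length_take, List.length_drop]
  omega

lemma clampIdx_spec (n : Nat) (i : Int) :
    (i < 0 ∧ (PySem.List.clampIdx n i : Int) = max ((n : Int) + i) 0) ∨
    (0 ≤ i ∧ (PySem.List.clampIdx n i : Int) = min i n) := by
  unfold PySem.List.clampIdx
  split_ifs with h1 h2
  · left; constructor; · omega
    · omega
  · left; constructor; · omega
    · omega
  · right; constructor; · omega
    · omega

lemma aux_eq : ∀ (fuel : Nat) (joyas : List Int) (ini fin : Int),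
    (fin - ini).toNat < fuel → 0 ≤ ini → ini ≤ fin → fin < joyas.length →
    encontrarAux fuel joyas ini fin = joyaLoopAux fuel (buildPref joyas) ini fin := by
  intro fuel
  induction fuel with
  | zero => intro _ _ _ h; omega
  | succ m ih =>
    intro joyas ini fin hfuel h0 hif hlen
    by_cases he : ini = fin
    · subst he
      have hdm := PySem.Int.floordiv_mul_add_mod (ini + ini) 2
      have hr0 : 0 ≤ PySem.Int.mod (ini + ini) 2 := PySem.Int.mod_nonneg _ (by norm_num)
      have hr1 : PySem.Int.mod (ini + ini) 2 < 2 := PySem.Int.mod_lt _ (by norm_num)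
      have hmid : PySem.Int.floordiv (ini + ini) 2 = ini := by omega
      rw [encontrarAux, joyaLoopAux, hmid]
      simp
    · have hlt : ini < fin := lt_of_le_of_ne hif he
      have hdm : PySem.Int.floordiv (ini + fin) 2 * 2 + PySem.Int.mod (ini + fin) 2 = ini + fin :=
        PySem.Int.floordiv_mul_add_mod (ini + fin) 2
      have hr0 : 0 ≤ PySem.Int.mod (ini + fin) 2 := PySem.Int.mod_nonneg _ (by norm_num)
      have hr1 : PySem.Int.mod (ini + fin) 2 < 2 := PySem.Int.mod_lt _ (by norm_num)
      have hmlo : ini ≤ PySem.Int.floordiv (ini + fin) 2 := by omega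
      have hmhi : PySem.Int.floordiv (ini + fin) 2 < fin := by omega
      set medio := PySem.Int.floordiv (ini + fin) 2 with hmdef
      rw [encontrarAux, joyaLoopAux]
      simp only [if_neg he, ge_iff_le, if_neg (show ¬ fin ≤ ini by omega)]
      by_cases hp : PySem.Int.mod (fin - ini) 2 = 0
      · -- even length of the range
        have hpe : (fin - ini) % 2 = 0 := by
          rwa [PySem.Int.mod_eq_emod_of_pos (by norm_num)] at hp
        have hfin2 : ini + 2 ≤ fin := by omega
        have hmlo2 : ini + 1 ≤ medio := by omega
        simp only [if_pos hp]
        rw [balanzaPy_eq _ _ (by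
          rw [slice_len joyas ini (medio + 1) h0 (by omega) (by omega),
              slice_len joyas medio (fin + 1) (by omega) (by omega) (by omega)]
          omega)]
        rw [slice_sum joyas ini (medio + 1) h0 (by omega) (by omega),
            slice_sum joyas medio (fin + 1) (by omega) (by omega) (by omega),
            segGet_buildPref joyas (medio + 1) (by omega) (by omega),
            segGet_buildPref joyas ini h0 (by omega),
            segGet_buildPref joyas (fin + 1) (by omega) (by omega),
            segGet_buildPref joyas medio (by omega) (by omega)]
        simp only [Option.getD_some]
        by_cases hse : (joyas.take (medio + 1).toNat).sum - (joyas.take ini.toNat).sum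
            = (joyas.take (fin + 1).toNat).sum - (joyas.take medio.toNat).sum
        · simp [hse]
        · by_cases hsg : (joyas.take (medio + 1).toNat).sum - (joyas.take ini.toNat).sum
              > (joyas.take (fin + 1).toNat).sum - (joyas.take medio.toNat).sum
          · simp only [if_neg hse, if_pos hsg]
            simp only [if_true]
            exact ih joyas ini (medio - 1) (by omega) h0 (by omega) (by omega)
          · simp only [if_neg hse, if_neg hsg]
            rw [if_neg (by decide), if_neg (by decide)]
            exact ih joyas (medio + 1) fin (by omega) (by omega) (by omega) hlen
      · -- odd length of the range
        simp only [if_neg hp]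
        rw [balanzaPy_eq _ _ (by
          rw [slice_len joyas ini (medio + 1) h0 (by omega) (by omega),
              slice_len joyas (medio + 1) (fin + 1) (by omega) (by omega) (by omega)]
          have hpo : (fin - ini) % 2 ≠ 0 := by
            rwa [PySem.Int.mod_eq_emod_of_pos (by norm_num)] at hp
          omega)]
        rw [slice_sum joyas ini (medio + 1) h0 (by omega) (by omega),
            slice_sum joyas (medio + 1) (fin + 1) (by omega) (by omega) (by omega),
            segGet_buildPref joyas (medio + 1) (by omega) (by omega),
            segGet_buildPref joyas ini h0 (by omega),
            segGet_buildPref joyas (fin + 1) (by omega) (by omega)]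
        simp only [Option.getD_some]
        by_cases hse : (joyas.take (medio + 1).toNat).sum - (joyas.take ini.toNat).sum
            = (joyas.take (fin + 1).toNat).sum - (joyas.take (medio + 1).toNat).sum
        · simp [hse]
        · by_cases hsg : (joyas.take (medio + 1).toNat).sum - (joyas.take ini.toNat).sum
              > (joyas.take (fin + 1).toNat).sum - (joyas.take (medio + 1).toNat).sum
          · simp only [if_neg hse, if_pos hsg]
            simp only [if_true]
            exact ih joyas ini medio (by omega) h0 (by omega) (by omega)
          · simp only [if_neg hse, if_neg hsg]
            rw [if_neg (by decide), if_neg (by decide)]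
            exact ih joyas (medio + 1) fin (by omega) (by omega) (by omega) hlen

-- ===== VERDICT (by name: the statement is the Claim_ definition above) =====
theorem encontrar_joya_py_spec : Claim_equal_encontrar_joya_py := by
  intro joyas ini fin _ hpre
  unfold Spec_encontrar_joya_py encontrar_joya_py encontrar_joya_py_alt
  rcases hpre with ⟨h0, hif, hlen⟩ | ⟨hge, hlens⟩
  · exact aux_eq _ joyas ini fin (by omega) h0 hif hlen
  · have hdm : PySem.Int.floordiv (ini + fin) 2 * 2 + PySem.Int.mod (ini + fin) 2 = ini + fin :=
      PySem.Int.floordiv_mul_add_mod (ini + fin) 2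
    have hr0 : 0 ≤ PySem.Int.mod (ini + fin) 2 := PySem.Int.mod_nonneg _ (by norm_num)
    have hr1 : PySem.Int.mod (ini + fin) 2 < 2 := PySem.Int.mod_lt _ (by norm_num)
    have hfz : (fin - ini).toNat = 0 := by omega
    rw [hfz]
    by_cases he : ini = fin
    · subst he
      have hmid : PySem.Int.floordiv (ini + ini) 2 = ini := by omega
      rw [encontrarAux, joyaLoopAux, hmid]
      simp
    · have hlt : fin < ini := lt_of_le_of_ne hge (fun h => he h.symm)
      set medio := PySem.Int.floordiv (ini + fin) 2 with hmdef
      rw [encontrarAux, joyaLoopAux]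
      simp only [if_neg he, ge_iff_le, if_pos hge]
      by_cases hp : PySem.Int.mod (fin - ini) 2 = 0
      · have hpe : (fin - ini) % 2 = 0 := by
          rwa [PySem.Int.mod_eq_emod_of_pos (by norm_num)] at hp
        have hlens' : PySem.List.clampIdx joyas.length (medio + 1) - PySem.List.clampIdx joyas.length ini
            = PySem.List.clampIdx joyas.length (fin + 1) - PySem.List.clampIdx joyas.length medio := by
          have := hlens
          rw [if_pos hp] at this
          unfold sliceLenP at this
          exact this
        have hz : PySem.List.clampIdx joyas.length (medio + 1) - PySem.List.clampIdx joyas.length ini = 0 ∧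
            PySem.List.clampIdx joyas.length (fin + 1) - PySem.List.clampIdx joyas.length medio = 0 := by
          rcases clampIdx_spec joyas.length ini with ⟨hq1, hc1⟩ | ⟨hq1, hc1⟩ <;>
          rcases clampIdx_spec joyas.length (medio + 1) with ⟨hq2, hc2⟩ | ⟨hq2, hc2⟩ <;>
          rcases clampIdx_spec joyas.length medio with ⟨hq3, hc3⟩ | ⟨hq3, hc3⟩ <;>
          rcases clampIdx_spec joyas.length (fin + 1) with ⟨hq4, hc4⟩ | ⟨hq4, hc4⟩ <;>
          omega
        have e1 : PySem.List.slice joyas (some ini) (some (medio + 1)) = [] := by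
          apply List.eq_nil_of_length_eq_zero
          rw [PySem.List.length_slice]
          omega
        have e2 : PySem.List.slice joyas (some medio) (some (fin + 1)) = [] := by
          apply List.eq_nil_of_length_eq_zero
          rw [PySem.List.length_slice]
          omega
        rw [if_pos hp, e1, e2]
        simp [balanzaPy]
      · have hpe : (fin - ini) % 2 ≠ 0 := by
          rwa [PySem.Int.mod_eq_emod_of_pos (by norm_num)] at hp
        have hlens' : PySem.List.clampIdx joyas.length (medio + 1) - PySem.List.clampIdx joyas.length ini
            = PySem.List.clampIdx joyas.length (fin + 1) - PySem.List.clampIdx joyas.length (medio + 1) := by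
          have := hlens
          rw [if_neg hp] at this
          unfold sliceLenP at this
          exact this
        have hz : PySem.List.clampIdx joyas.length (medio + 1) - PySem.List.clampIdx joyas.length ini = 0 ∧
            PySem.List.clampIdx joyas.length (fin + 1) - PySem.List.clampIdx joyas.length (medio + 1) = 0 := by
          rcases clampIdx_spec joyas.length ini with ⟨hq1, hc1⟩ | ⟨hq1, hc1⟩ <;>
          rcases clampIdx_spec joyas.length (medio + 1) with ⟨hq2, hc2⟩ | ⟨hq2, hc2⟩ <;>
          rcases clampIdx_spec joyas.length (fin + 1) with ⟨hq4, hc4⟩ | ⟨hq4, hc4⟩ <;>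
          omega
        have e1 : PySem.List.slice joyas (some ini) (some (medio + 1)) = [] := by
          apply List.eq_nil_of_length_eq_zero
          rw [PySem.List.length_slice]
          omega
        have e2 : PySem.List.slice joyas (some (medio + 1)) (some (fin + 1)) = [] := by
          apply List.eq_nil_of_length_eq_zero
          rw [PySem.List.length_slice]
          omega
        rw [if_neg hp, e1, e2]
        simp [balanzaPy]
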